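-- pv_equiv track=rewrite | github.com/Averbea/AdventOfCode | 2023/13/solution.py | find_diff_count_one
-- ===== SOURCE A (Python) =====
-- def find_diff_count_one(pattern):
--     for to_top in range(1, len(pattern)):
--         diffs = 0
--         to_bottom = len(pattern) - to_top
--         amount_to_check = min(to_top, to_bottom)
--
--         for i in range(amount_to_check):
--             diffs += sum(c1 != c2 for c1, c2 in zip(pattern[to_top - i - 1], pattern[to_top + i]))
--             if diffs > 1:
--                 break
--         if diffs == 1:
--             return to_top
-- ===== SOURCE B (Python) =====
-- def find_diff_count_one(pattern):
--     n = len(pattern)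
--     # Bucket the Hamming distance of every row pair (j, k), j < k, by its
--     # anti-diagonal j + k.  A mirror line above row t reflects exactly the
--     # pairs on anti-diagonal 2*t - 1, so the answer is the first t whose
--     # bucket totals exactly 1.
--     diag = [0] * (2 * n)
--     for j in range(n):
--         for k in range(j + 1, n):
--             diag[j + k] += sum(a != b for a, b in zip(pattern[j], pattern[k]))
--     for t in range(1, n):
--         if diag[2 * t - 1] == 1:
--             return t
--     return None
-- ===== Notes on version B (the rewrite author's own statement) =====
-- stated objective: alternative
-- what changed: A scans the mirrored row pairs of each candidate line, accumulating mismatches with an early break; B instead makes one pass over ALL row pairs, bucketing each pair's Hamming distance by its anti-diagonal j+k, then picks the first line t whose anti-diagonal 2t-1 bucket totals exactly 1 (the mirrored pairs of t are exactly the pairs on that anti-diagonal).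
import Mathlib
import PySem

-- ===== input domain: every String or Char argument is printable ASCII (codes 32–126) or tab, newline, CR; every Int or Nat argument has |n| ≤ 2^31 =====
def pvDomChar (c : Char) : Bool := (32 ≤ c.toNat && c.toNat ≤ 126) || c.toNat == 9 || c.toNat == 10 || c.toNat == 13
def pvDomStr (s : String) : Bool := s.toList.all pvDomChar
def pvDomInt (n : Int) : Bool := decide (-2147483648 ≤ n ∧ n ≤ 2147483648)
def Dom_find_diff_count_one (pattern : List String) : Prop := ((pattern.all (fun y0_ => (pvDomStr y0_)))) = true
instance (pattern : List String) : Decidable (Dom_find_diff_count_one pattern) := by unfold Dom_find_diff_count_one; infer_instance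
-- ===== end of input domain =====

-- B replaces A's per-candidate scan of mirrored row pairs (with early break) by one pass
-- over ALL row pairs that buckets each pair's Hamming distance by its anti-diagonal j+k,
-- then returns the first line t whose bucket 2t-1 totals exactly 1 (alternative, same cost).

-- ===== PORT A =====
-- pattern[k] (k always in range where A reads, so the default is never used)
def pvRowA (pattern : List String) (k : Int) : String :=
  (PySem.List.pyGet? pattern k).getD ""

-- sum(c1 != c2 for c1, c2 in zip(pattern[...], pattern[...]))
def pvRowDiffA (a b : String) : Int :=
  (a.toList.zip b.toList).foldl (fun acc p => acc + (if p.1 ≠ p.2 then 1 else 0)) 0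

-- inner 'for i in range(amount_to_check)' with the 'break' on diffs > 1
def pvInnerA (pattern : List String) (to_top : Int) : List Int → Int → Int
  | [], diffs => diffs
  | i :: rest, diffs =>
    let diffs' := diffs + pvRowDiffA (pvRowA pattern (to_top - i - 1)) (pvRowA pattern (to_top + i))
    if diffs' > 1 then diffs' else pvInnerA pattern to_top rest diffs'

-- outer 'for to_top in range(1, len(pattern))' with the early return
def pvOuterA (pattern : List String) : List Int → Option Int
  | [] => none
  | to_top :: rest =>
    let to_bottom : Int := (pattern.length : Int) - to_top
    let amount_to_check := min to_top to_bottom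
    let diffs := pvInnerA pattern to_top (PySem.List.pyRange 0 amount_to_check 1) 0
    if diffs = 1 then some to_top else pvOuterA pattern rest

def find_diff_count_one (pattern : List String) : Option Int :=
  pvOuterA pattern (PySem.List.pyRange 1 (pattern.length : Int) 1)

-- ===== PORT B =====
def pvRowB (pattern : List String) (k : Int) : String :=
  (PySem.List.pyGet? pattern k).getD ""

-- sum(a != b for a, b in zip(pattern[j], pattern[k]))
def pvHamB (a b : String) : Int :=
  (a.toList.zip b.toList).foldl (fun acc p => acc + (if p.1 ≠ p.2 then 1 else 0)) 0

-- 'diag = [0]*(2*n)' then the double loop 'diag[j+k] += …'; the write index j+k is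
-- nonnegative and < 2n on every reached iteration, so 'set (j+k).toNat' is exact here.
def pvDiagB (pattern : List String) : List Int :=
  (PySem.List.pyRange 0 (pattern.length : Int) 1).foldl (fun diag j =>
    (PySem.List.pyRange (j + 1) (pattern.length : Int) 1).foldl (fun diag k =>
      diag.set (j + k).toNat
        (PySem.List.pyGetD diag (j + k) 0 + pvHamB (pvRowB pattern j) (pvRowB pattern k)))
      diag)
    (List.replicate (2 * pattern.length) 0)

-- 'for t in range(1, n): if diag[2*t-1] == 1: return t'
def pvScanB (diag : List Int) : List Int → Option Int
  | [] => none
  | t :: rest => if PySem.List.pyGetD diag (2 * t - 1) 0 = 1 then some t else pvScanB diag rest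

def find_diff_count_one_alt (pattern : List String) : Option Int :=
  pvScanB (pvDiagB pattern) (PySem.List.pyRange 1 (pattern.length : Int) 1)

-- ===== PRECONDITION & SPEC =====
def Spec_find_diff_count_one (pattern : List String) (out : Option Int) : Prop := out = find_diff_count_one_alt pattern
instance (pattern : List String) (out : Option Int) : Decidable (Spec_find_diff_count_one pattern out) := by unfold Spec_find_diff_count_one; infer_instance

-- ===== CLAIM (what is proved, stated in full; the proofs are below) =====
def Claim_equal_find_diff_count_one : Prop := ∀ (pattern : List String), Dom_find_diff_count_one pattern → Spec_find_diff_count_one pattern (find_diff_count_one pattern)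

-- ===== LEMMAS AND PROOFS =====

-- the list of row pairs (j, k), j < k, that B's double loop visits, in order
def pvPairs (n : Int) : List (Int × Int) :=
  (PySem.List.pyRange 0 n 1).flatMap (fun j =>
    (PySem.List.pyRange (j + 1) n 1).map (fun k => (j, k)))

theorem pvFoldDiff_mono (l : List (Char × Char)) :
    ∀ acc : Int, acc ≤ l.foldl (fun a p => a + (if p.1 ≠ p.2 then 1 else 0)) acc := by
  induction l with
  | nil => intro acc; simp
  | cons p rest ih =>
    intro acc
    simp only [List.foldl_cons]
    calc acc ≤ acc + (if p.1 ≠ p.2 then 1 else 0) := by split <;> omega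
      _ ≤ _ := ih _

theorem pvRowDiffA_nonneg (a b : String) : 0 ≤ pvRowDiffA a b := pvFoldDiff_mono _ 0

-- A's inner loop with break returns 1 iff the full (un-broken) mismatch total is 1
theorem pvInnerA_eq_one (pattern : List String) (t : Int) (is : List Int) :
    ∀ (d : Int), 0 ≤ d →
      (pvInnerA pattern t is d = 1 ↔
        d + (is.map (fun i =>
          pvRowDiffA (pvRowA pattern (t - i - 1)) (pvRowA pattern (t + i)))).sum = 1) := by
  induction is with
  | nil => intro d _; simp [pvInnerA]
  | cons i rest ih =>
    intro d hd
    have hnn : 0 ≤ pvRowDiffA (pvRowA pattern (t - i - 1)) (pvRowA pattern (t + i)) :=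
      pvRowDiffA_nonneg _ _
    have hsum : 0 ≤ (rest.map (fun i =>
        pvRowDiffA (pvRowA pattern (t - i - 1)) (pvRowA pattern (t + i)))).sum := by
      apply List.sum_nonneg
      intro x hx
      obtain ⟨j, _, rfl⟩ := List.mem_map.mp hx
      exact pvRowDiffA_nonneg _ _
    simp only [pvInnerA, List.map_cons, List.sum_cons]
    set h := pvRowDiffA (pvRowA pattern (t - i - 1)) (pvRowA pattern (t + i)) with hh
    by_cases hbig : d + h > 1
    · simp only [if_pos hbig]
      constructor
      · intro h1; omega
      · intro h1; omega
    · simp only [if_neg hbig]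
      rw [ih (d + h) (by omega)]
      constructor <;> intro h1 <;> omega

-- fold of bucket updates: the final value of bucket m is the initial value plus the
-- contributions of exactly the visited pairs whose index lands on m
theorem pvFoldSet_getD (g : Int × Int → Int) :
    ∀ (xs : List (Int × Int)) (l : List Int),
      (∀ x ∈ xs, 0 ≤ x.1 + x.2 ∧ (x.1 + x.2).toNat < l.length) → ∀ (m : Nat),
      ((xs.foldl (fun d x => d.set (x.1 + x.2).toNat
          (PySem.List.pyGetD d (x.1 + x.2) 0 + g x)) l).getD m 0)
        = l.getD m 0 + ((xs.filter (fun x => (x.1 + x.2).toNat == m)).map g).sum := by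
  intro xs
  induction xs with
  | nil => intro l h m; simp
  | cons x xs ih =>
    intro l h m
    simp only [List.foldl_cons]
    obtain ⟨hx0, hxlen⟩ := h x (List.mem_cons_self ..)
    have hread : PySem.List.pyGetD l (x.1 + x.2) 0 = l.getD (x.1 + x.2).toNat 0 := by
      rw [PySem.List.pyGetD_of_nonneg _ _ hx0]
    set l' := l.set (x.1 + x.2).toNat
      (PySem.List.pyGetD l (x.1 + x.2) 0 + g x) with hl'
    have hlen' : l'.length = l.length := by simp [hl']
    have hrec := ih l' (by intro y hy; rw [hlen']; exact h y (List.mem_cons_of_mem _ hy)) m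
    rw [hrec]
    by_cases hm : (x.1 + x.2).toNat = m
    · rw [List.filter_cons_of_pos (by simp [hm])]
      have hv : l'.getD m 0 = l.getD m 0 + g x := by
        rw [hl', List.getD_eq_getElem?_getD, List.getElem?_set, if_pos hm, if_pos hxlen]
        simp [hread, hm, List.getD_eq_getElem?_getD]
      rw [hv]
      simp only [List.map_cons, List.sum_cons]
      ring
    · rw [List.filter_cons_of_neg (by simp [hm])]
      have hv : l'.getD m 0 = l.getD m 0 := by
        rw [hl', List.getD_eq_getElem?_getD, List.getElem?_set, if_neg hm,
          ← List.getD_eq_getElem?_getD]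
      rw [hv]

theorem pvFoldl_flatMap {α β γ : Type} (f : α → List β) (g : γ → β → γ) :
    ∀ (l : List α) (init : γ),
      (l.flatMap f).foldl g init = l.foldl (fun acc x => (f x).foldl g acc) init := by
  intro l
  induction l with
  | nil => intro init; rfl
  | cons a l ih => intro init; simp only [List.flatMap_cons, List.foldl_append,
      List.foldl_cons, ih]

-- the contribution of the pair x of rows
def pvG (pattern : List String) (x : Int × Int) : Int :=
  pvHamB (pvRowB pattern x.1) (pvRowB pattern x.2)

-- B's double loop is the single fold of bucket updates over pvPairs
theorem pvDiagB_eq_pairs (pattern : List String) :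
    pvDiagB pattern = (pvPairs (pattern.length : Int)).foldl
      (fun d x => d.set (x.1 + x.2).toNat
        (PySem.List.pyGetD d (x.1 + x.2) 0 + pvG pattern x))
      (List.replicate (2 * pattern.length) 0) := by
  unfold pvDiagB pvPairs pvG
  rw [pvFoldl_flatMap]
  simp only [List.foldl_map]

theorem mem_pvPairs {n : Int} {x : Int × Int} :
    x ∈ pvPairs n ↔ 0 ≤ x.1 ∧ x.1 < x.2 ∧ x.2 < n := by
  unfold pvPairs
  simp only [List.mem_flatMap, List.mem_map, PySem.List.mem_pyRange_one]
  constructor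
  · rintro ⟨j, ⟨hj0, hjn⟩, k, ⟨hk1, hkn⟩, rfl⟩
    exact ⟨hj0, by omega, hkn⟩
  · rintro ⟨h1, h2, h3⟩
    exact ⟨x.1, ⟨h1, by omega⟩, x.2, ⟨by omega, h3⟩, rfl⟩

theorem sum_map_flatMap {α β : Type} (l : List α) (f : α → List β) (g : β → Int) :
    ((l.flatMap f).map g).sum = (l.map (fun a => ((f a).map g).sum)).sum := by
  induction l with
  | nil => rfl
  | cons a l ih => simp only [List.flatMap_cons, List.map_append, List.sum_append,
      List.map_cons, List.sum_cons, ih]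

theorem pvFilter_flatMap {α β : Type} (l : List α) (f : α → List β) (p : β → Bool) :
    (l.flatMap f).filter p = l.flatMap (fun a => (f a).filter p) := by
  induction l with
  | nil => rfl
  | cons a l ih => simp only [List.flatMap_cons, List.filter_append, ih]

theorem filter_eq_pyRange (a b v : Int) :
    (PySem.List.pyRange a b 1).filter (· == v) = if a ≤ v ∧ v < b then [v] else [] := by
  rw [List.filter_beq]
  by_cases h : a ≤ v ∧ v < b
  · rw [if_pos h, List.count_eq_one_of_mem (PySem.List.nodup_pyRange_one a b)
      (PySem.List.mem_pyRange_one.mpr h)]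
    rfl
  · rw [if_neg h, List.count_eq_zero_of_not_mem
      (fun hm => h (PySem.List.mem_pyRange_one.mp hm))]
    rfl

-- reflection of a sum over List.range
theorem sum_range_reflect_int (F : Int → Int) :
    ∀ (N : Nat), ((List.range N).map (fun (q : Nat) => F (q : Int))).sum
      = ((List.range N).map (fun (q : Nat) => F ((N : Int) - 1 - (q : Int)))).sum := by
  intro N
  induction N with
  | zero => rfl
  | succ N ih =>
    have hL : ((List.range (N + 1)).map (fun (q : Nat) => F (q : Int))).sum
        = ((List.range N).map (fun (q : Nat) => F (q : Int))).sum + F (N : Int) := by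
      rw [List.range_succ]
      simp
    have hR : ((List.range (N + 1)).map (fun (q : Nat) =>
          F (((N + 1 : Nat) : Int) - 1 - (q : Int)))).sum
        = F (N : Int) + ((List.range N).map (fun (q : Nat) =>
            F ((N : Int) - 1 - (q : Int)))).sum := by
      rw [List.range_succ_eq_map]
      rw [List.map_cons, List.sum_cons, List.map_map]
      congr 1
      · exact congrArg F (by push_cast; ring)
      · apply congrArg List.sum
        apply List.map_congr_left
        intro q hq
        simp only [Function.comp_apply]
        exact congrArg F (by push_cast; ring)
    rw [hL, hR, ← ih]
    ring

theorem sum_reflect' (G : Int → Int) (a : Int) (N : Nat) :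
    ((List.range N).map (fun (q : Nat) => G (a + (q : Int)))).sum
      = ((List.range N).map (fun (q : Nat) => G (a + (N : Int) - 1 - (q : Int)))).sum := by
  have h := sum_range_reflect_int (fun x => G (a + x)) N
  simp only [] at h
  rw [h]
  apply congrArg List.sum
  apply List.map_congr_left
  intro q hq
  exact congrArg G (by ring)

-- the bucket of anti-diagonal 2t-1 collects exactly the mirrored pairs of line t
theorem pvBucket_eq_mirror (pattern : List String) (t : Int)
    (ht1 : 1 ≤ t) (htn : t < (pattern.length : Int)) :
    PySem.List.pyGetD (pvDiagB pattern) (2 * t - 1) 0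
      = ((PySem.List.pyRange 0 (min t ((pattern.length : Int) - t)) 1).map (fun i =>
          pvRowDiffA (pvRowA pattern (t - i - 1)) (pvRowA pattern (t + i)))).sum := by
  set n : Int := (pattern.length : Int) with hn
  have hn0 : 0 ≤ n := by positivity
  set m : Int := min t (n - t) with hmdef
  have hm1 : m ≤ t := min_le_left _ _
  have hm2 : m ≤ n - t := min_le_right _ _
  have hm3 : m = t ∨ m = n - t := min_choice _ _
  have hm0 : 0 ≤ m := by omega
  -- 1. the bucket value via the fold lemma
  have hside : ∀ x ∈ pvPairs n, 0 ≤ x.1 + x.2 ∧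
      (x.1 + x.2).toNat < (List.replicate (2 * pattern.length) (0 : Int)).length := by
    intro x hx
    obtain ⟨h1, h2, h3⟩ := mem_pvPairs.mp hx
    rw [List.length_replicate]
    omega
  have hval : PySem.List.pyGetD (pvDiagB pattern) (2 * t - 1) 0
      = (((pvPairs n).filter (fun x => (x.1 + x.2).toNat == (2 * t - 1).toNat)).map
          (pvG pattern)).sum := by
    rw [PySem.List.pyGetD_of_nonneg _ _ (by omega), pvDiagB_eq_pairs,
      pvFoldSet_getD (pvG pattern) (pvPairs n) _ hside]
    rw [List.getD_eq_getElem?_getD, List.getElem?_replicate]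
    split <;> simp
  -- 2. the filter condition on pairs is the Int equation
  have hfc : ((pvPairs n).filter (fun x => (x.1 + x.2).toNat == (2 * t - 1).toNat))
      = ((pvPairs n).filter (fun x => x.1 + x.2 == 2 * t - 1)) := by
    apply List.filter_congr
    intro x hx
    obtain ⟨h1, h2, h3⟩ := mem_pvPairs.mp hx
    rw [Bool.eq_iff_iff]
    simp only [beq_iff_eq]
    omega
  -- 3. resolve the pair filter: per j there is at most the partner 2t-1-j
  have hinner : ∀ j : Int, ((PySem.List.pyRange (j + 1) n 1).map (fun k => (j, k))).filter
        (fun x => x.1 + x.2 == 2 * t - 1)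
      = (if j + 1 ≤ 2 * t - 1 - j ∧ 2 * t - 1 - j < n then [(j, 2 * t - 1 - j)] else []) := by
    intro j
    rw [List.filter_map]
    have h1 : (PySem.List.pyRange (j + 1) n 1).filter
          ((fun (x : Int × Int) => x.1 + x.2 == 2 * t - 1) ∘ (fun k => (j, k)))
        = (PySem.List.pyRange (j + 1) n 1).filter (· == 2 * t - 1 - j) := by
      apply List.filter_congr
      intro k hk
      rw [Bool.eq_iff_iff]
      simp only [Function.comp_apply, beq_iff_eq]
      omega
    rw [h1, filter_eq_pyRange]
    split <;> simp
  have hflat : ((pvPairs n).filter (fun x => x.1 + x.2 == 2 * t - 1)).map (pvG pattern)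
      = ((PySem.List.pyRange 0 n 1).flatMap (fun j =>
          if j + 1 ≤ 2 * t - 1 - j ∧ 2 * t - 1 - j < n
          then [(j, 2 * t - 1 - j)] else [])).map (pvG pattern) := by
    unfold pvPairs
    rw [pvFilter_flatMap]
    simp only [hinner]
  -- 4. the resulting sum over j
  have hsum : (((pvPairs n).filter (fun x => x.1 + x.2 == 2 * t - 1)).map (pvG pattern)).sum
      = ((PySem.List.pyRange 0 n 1).map (fun j =>
          if j + 1 ≤ 2 * t - 1 - j ∧ 2 * t - 1 - j < n
          then pvG pattern (j, 2 * t - 1 - j) else 0)).sum := by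
    rw [hflat, sum_map_flatMap]
    apply congrArg List.sum
    apply List.map_congr_left
    intro j hj
    split <;> simp
  -- 5. only j ∈ [t-m, t) contributes
  have e1 : PySem.List.pyRange 0 n 1 = PySem.List.pyRange 0 t 1 ++ PySem.List.pyRange t n 1 :=
    PySem.List.pyRange_one_append 0 t n (by omega) (by omega)
  have e2 : PySem.List.pyRange 0 t 1
      = PySem.List.pyRange 0 (t - m) 1 ++ PySem.List.pyRange (t - m) t 1 :=
    PySem.List.pyRange_one_append 0 (t - m) t (by omega) (by omega)
  have hmid : ((PySem.List.pyRange 0 n 1).map (fun j =>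
        if j + 1 ≤ 2 * t - 1 - j ∧ 2 * t - 1 - j < n
        then pvG pattern (j, 2 * t - 1 - j) else 0)).sum
      = ((PySem.List.pyRange (t - m) t 1).map (fun j => pvG pattern (j, 2 * t - 1 - j))).sum := by
    rw [e1, e2]
    simp only [List.map_append, List.sum_append]
    have hz1 : ((PySem.List.pyRange 0 (t - m) 1).map (fun j =>
        if j + 1 ≤ 2 * t - 1 - j ∧ 2 * t - 1 - j < n
        then pvG pattern (j, 2 * t - 1 - j) else 0)).sum = 0 := by
      apply List.sum_eq_zero
      intro x hx
      obtain ⟨j, hj, rfl⟩ := List.mem_map.mp hx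
      obtain ⟨hj0, hjlt⟩ := PySem.List.mem_pyRange_one.mp hj
      rw [if_neg (by omega)]
    have hz3 : ((PySem.List.pyRange t n 1).map (fun j =>
        if j + 1 ≤ 2 * t - 1 - j ∧ 2 * t - 1 - j < n
        then pvG pattern (j, 2 * t - 1 - j) else 0)).sum = 0 := by
      apply List.sum_eq_zero
      intro x hx
      obtain ⟨j, hj, rfl⟩ := List.mem_map.mp hx
      obtain ⟨hj0, hjlt⟩ := PySem.List.mem_pyRange_one.mp hj
      rw [if_neg (by omega)]
    have hmid' : ((PySem.List.pyRange (t - m) t 1).map (fun j =>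
        if j + 1 ≤ 2 * t - 1 - j ∧ 2 * t - 1 - j < n
        then pvG pattern (j, 2 * t - 1 - j) else 0)).sum
        = ((PySem.List.pyRange (t - m) t 1).map (fun j => pvG pattern (j, 2 * t - 1 - j))).sum := by
      apply congrArg List.sum
      apply List.map_congr_left
      intro j hj
      obtain ⟨hj0, hjlt⟩ := PySem.List.mem_pyRange_one.mp hj
      rw [if_pos (by omega)]
    rw [hz1, hz3, hmid']
    ring
  -- 6. reflect the middle range onto the mirrored indices of A
  have hcast : ((m.toNat : Nat) : Int) = m := Int.toNat_of_nonneg hm0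
  have hreflect : ((PySem.List.pyRange (t - m) t 1).map
        (fun j => pvG pattern (j, 2 * t - 1 - j))).sum
      = ((PySem.List.pyRange 0 m 1).map (fun i =>
          pvRowDiffA (pvRowA pattern (t - i - 1)) (pvRowA pattern (t + i)))).sum := by
    rw [PySem.List.pyRange_one (t - m) t, PySem.List.pyRange_one 0 m]
    have hM : (t - (t - m)).toNat = m.toNat := by omega
    have hM2 : (m - 0).toNat = m.toNat := by omega
    rw [hM, hM2, List.map_map, List.map_map]
    simp only [Function.comp_def]
    rw [sum_reflect' (fun j => pvG pattern (j, 2 * t - 1 - j)) (t - m) m.toNat]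
    apply congrArg List.sum
    apply List.map_congr_left
    intro q hq
    have ea : t - m + ((m.toNat : Nat) : Int) - 1 - (q : Int) = t - (0 + (q : Int)) - 1 := by
      rw [hcast]; ring
    rw [ea]
    have ec : 2 * t - 1 - (t - (0 + (q : Int)) - 1) = t + (0 + (q : Int)) := by ring
    rw [ec]
    rfl
  rw [hval, hfc, hsum, hmid, hreflect]

-- the per-candidate conditions of A and B agree
theorem pvCond_iff (pattern : List String) (t : Int)
    (ht1 : 1 ≤ t) (htn : t < (pattern.length : Int)) :
    (pvInnerA pattern t
        (PySem.List.pyRange 0 (min t ((pattern.length : Int) - t)) 1) 0 = 1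
      ↔ PySem.List.pyGetD (pvDiagB pattern) (2 * t - 1) 0 = 1) := by
  rw [pvBucket_eq_mirror pattern t ht1 htn,
    pvInnerA_eq_one pattern t _ 0 le_rfl, zero_add]

theorem pvScan_eq (pattern : List String) :
    ∀ ts : List Int, (∀ t ∈ ts, 1 ≤ t ∧ t < (pattern.length : Int)) →
      pvOuterA pattern ts = pvScanB (pvDiagB pattern) ts := by
  intro ts
  induction ts with
  | nil => intro _; rfl
  | cons t rest ih =>
    intro h
    obtain ⟨ht1, htn⟩ := h t (List.mem_cons_self ..)
    simp only [pvOuterA, pvScanB]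
    have hiff := pvCond_iff pattern t ht1 htn
    by_cases hA : pvInnerA pattern t
        (PySem.List.pyRange 0 (min t ((pattern.length : Int) - t)) 1) 0 = 1
    · rw [if_pos hA, if_pos (hiff.mp hA)]
    · rw [if_neg hA, if_neg (fun hB => hA (hiff.mpr hB)),
        ih (fun x hx => h x (List.mem_cons_of_mem _ hx))]

-- ===== VERDICT (by name: the statement is the Claim_ definition above) =====
theorem find_diff_count_one_spec : Claim_equal_find_diff_count_one := by
  intro pattern _
  unfold Spec_find_diff_count_one find_diff_count_one find_diff_count_one_alt
  apply pvScan_eq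
  intro t ht
  exact PySem.List.mem_pyRange_one.mp ht
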